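-- pv_equiv track=rewrite | github.com/ahmadmwali/HausaSeq2Seq | src/calculate_levenshtein_distance.py | comparison_groups
-- ===== SOURCE A (Python) =====
-- from collections import defaultdict, Counter
--
-- def comparison_groups(word_list: list) -> list:
--     """
--     Group unique words into overlapping windows of length [L-1, L, L+1].
--     Returns a list of word lists.
--     """
--     by_len = defaultdict(list)
--     for w in set(word_list):
--         by_len[len(w)].append(w)
--     groups = []
--     for length in sorted(by_len):
--         group = list(by_len[length])
--         if length - 1 in by_len:
--             group.extend(by_len[length - 1])
--         if length + 1 in by_len:
--             group.extend(by_len[length + 1])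
--         unique = sorted(set(group))
--         if len(unique) >= 2:
--             groups.append(unique)
--     return groups
-- ===== SOURCE B (Python) =====
-- def comparison_groups(word_list: list) -> list:
--     """
--     Group unique words into overlapping windows of length [L-1, L, L+1].
--     Returns a list of word lists.
--     """
--     ordered = sorted(set(word_list))
--     lengths = sorted({len(w) for w in ordered})
--     groups = []
--     for length in lengths:
--         group = [w for w in ordered if length - 1 <= len(w) <= length + 1]
--         if len(group) >= 2:
--             groups.append(group)
--     return groups
-- ===== Notes on version B (the rewrite author's own statement) =====
-- stated objective: simpler
-- what changed: B drops A's length-keyed dict of word buckets and its per-window sort+dedup: it sorts the dedup'd words once and, for each distinct length, takes one filter pass over that already-sorted unique list, appending it when it has at least two words.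
import Mathlib
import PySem

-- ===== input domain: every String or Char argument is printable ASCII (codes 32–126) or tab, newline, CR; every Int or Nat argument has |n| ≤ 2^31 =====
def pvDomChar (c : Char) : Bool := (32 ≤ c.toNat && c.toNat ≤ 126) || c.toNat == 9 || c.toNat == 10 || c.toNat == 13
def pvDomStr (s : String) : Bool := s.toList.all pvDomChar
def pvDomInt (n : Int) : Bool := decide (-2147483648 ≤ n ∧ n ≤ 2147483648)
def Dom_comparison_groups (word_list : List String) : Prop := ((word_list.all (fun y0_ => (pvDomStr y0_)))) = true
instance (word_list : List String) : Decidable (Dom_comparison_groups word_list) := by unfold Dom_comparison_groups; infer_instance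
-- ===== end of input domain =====

-- B replaces A's length-keyed dict of word buckets by one sorted dedup pass plus a
-- per-length filter of the already-sorted list, so no per-window re-sort/dedup is needed (simpler).

-- ===== PORT A =====
def comparison_groups (word_list : List String) : List (List String) :=
  let uniq : List String := PySem.Set.ofList word_list
  let by_len : PySem.Dict Int (List String) :=
    uniq.foldl (fun d w => d.modify (PySem.Str.len w) [] (fun l => l ++ [w])) ⟨[]⟩
  (PySem.List.sorted by_len.keys id).foldl (fun groups length =>
    let group := by_len.getD length []
    let group := if by_len.contains (length - 1) then group ++ by_len.getD (length - 1) [] else group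
    let group := if by_len.contains (length + 1) then group ++ by_len.getD (length + 1) [] else group
    let unique := PySem.List.sorted (PySem.Set.ofList group) id
    if 2 ≤ unique.length then groups ++ [unique] else groups) []

-- ===== PORT B =====
def comparison_groups_alt (word_list : List String) : List (List String) :=
  let ordered : List String := PySem.List.sorted (PySem.Set.ofList word_list) id
  let lengths : List Int := PySem.List.sorted (PySem.Set.ofList (ordered.map PySem.Str.len)) id
  lengths.foldl (fun groups length =>
    let group := ordered.filter
      (fun w => decide (length - 1 ≤ PySem.Str.len w) && decide (PySem.Str.len w ≤ length + 1))
    if 2 ≤ group.length then groups ++ [group] else groups) []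

-- ===== PRECONDITION & SPEC =====
def Spec_comparison_groups (word_list : List String) (out : List (List String)) : Prop := out = comparison_groups_alt word_list
instance (word_list : List String) (out : List (List String)) : Decidable (Spec_comparison_groups word_list out) := by unfold Spec_comparison_groups; infer_instance

-- ===== CLAIM (what is proved, stated in full; the proofs are below) =====
def Claim_equal_comparison_groups : Prop := ∀ (word_list : List String), Dom_comparison_groups word_list → Spec_comparison_groups word_list (comparison_groups word_list)

-- ===== LEMMAS AND PROOFS =====

-- general facts about PySem.Dict not in the prelude
theorem pv_keys_insert {κ ν : Type} [BEq κ] [LawfulBEq κ] (d : PySem.Dict κ ν) (k : κ) (v : ν) :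
    (d.insert k v).keys = if d.contains k then d.keys else d.keys ++ [k] := by
  by_cases h : d.contains k = true
  · simp only [PySem.Dict.insert, PySem.Dict.keys, h, if_true, List.map_map]
    refine List.map_congr_left fun p _ => ?_
    by_cases hp : p.1 = k <;> simp [Function.comp, hp]
  · simp [PySem.Dict.insert, PySem.Dict.keys, h]

theorem pv_contains_iff_mem_keys {κ ν : Type} [BEq κ] [LawfulBEq κ] (d : PySem.Dict κ ν) (k : κ) :
    d.contains k = true ↔ k ∈ d.keys := by
  simp only [PySem.Dict.contains, PySem.Dict.keys, List.any_eq_true, List.mem_map, beq_iff_eq]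

-- the dict-building loop of A, characterised
theorem pv_fold_getD (ws : List String) (d : PySem.Dict Int (List String)) (L : Int) :
    (ws.foldl (fun d w => d.modify (PySem.Str.len w) [] (fun l => l ++ [w])) d).getD L []
      = d.getD L [] ++ ws.filter (fun w => PySem.Str.len w == L) := by
  induction ws generalizing d with
  | nil => simp
  | cons w ws ih =>
      rw [List.foldl_cons, ih, List.filter_cons]
      simp only [PySem.Dict.modify, PySem.Dict.getD_insert, PySem.Str.len]
      by_cases h : L = (w.length : Int)
      · simp [h]
      · have h' : ¬ ((w.length : Int) = L) := fun he => h he.symm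
        simp [h, h']

theorem pv_fold_contains (ws : List String) (d : PySem.Dict Int (List String)) (L : Int) :
    (ws.foldl (fun d w => d.modify (PySem.Str.len w) [] (fun l => l ++ [w])) d).contains L
      = (d.contains L || decide (L ∈ ws.map PySem.Str.len)) := by
  induction ws generalizing d with
  | nil => simp
  | cons w ws ih =>
      rw [List.foldl_cons, ih]
      simp only [PySem.Dict.modify, PySem.Dict.contains_insert, List.map_cons, List.mem_cons,
        PySem.Str.len]
      by_cases h : L = (w.length : Int)
      · simp [h]
      · have hb : (L == (w.length : Int)) = false := by simp [h]
        simp [h, hb]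

theorem pv_fold_keys_nodup (ws : List String) (d : PySem.Dict Int (List String))
    (hd : d.keys.Nodup) :
    (ws.foldl (fun d w => d.modify (PySem.Str.len w) [] (fun l => l ++ [w])) d).keys.Nodup := by
  induction ws generalizing d with
  | nil => exact hd
  | cons w ws ih =>
      refine ih _ ?_
      simp only [PySem.Dict.modify, pv_keys_insert]
      split
      · exact hd
      · next h =>
          have hk : PySem.Str.len w ∉ d.keys := fun hm =>
            h ((pv_contains_iff_mem_keys d _).mpr hm)
          rw [List.nodup_append]
          refine ⟨hd, List.nodup_singleton _, ?_⟩
          intro a ha b hb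
          rw [List.mem_singleton] at hb
          subst hb
          exact fun he => hk (he ▸ ha)

-- sorting a permuted nodup list gives the same result
theorem pv_sorted_eq_of_perm_nodup {α : Type} [LinearOrder α] (xs ys : List α)
    (h : xs.Perm ys) (hys : ys.Nodup) : PySem.List.sorted xs id = PySem.List.sorted ys id := by
  refine PySem.List.sorted_eq_of_perm_of_pairwise_lt xs (PySem.List.sorted ys id) id ?_ ?_
  · exact (PySem.List.sorted_perm ys id false).trans h.symm
  · have hnd : (PySem.List.sorted ys id).Nodup :=
      ((PySem.List.sorted_perm ys id false).nodup_iff).mpr hys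
    have hle := PySem.List.sorted_pairwise ys id
    exact (hle.and hnd).imp (fun hab => lt_of_le_of_ne hab.1 hab.2)

theorem pv_mem_sorted {α κ : Type} [LT κ] [DecidableLT κ] (xs : List α) (key : α → κ) (x : α) :
    x ∈ PySem.List.sorted xs key ↔ x ∈ xs :=
  (PySem.List.sorted_perm xs key false).mem_iff

-- the two loop bodies produce the same window for every length
theorem pv_body_eq (U : List String) (hU : U.Nodup)
    (D : PySem.Dict Int (List String))
    (hg : ∀ L, D.getD L [] = U.filter (fun w => PySem.Str.len w == L))
    (hc : ∀ L, D.contains L = decide (L ∈ U.map PySem.Str.len)) (L : Int) :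
    PySem.List.sorted (PySem.Set.ofList
      (if D.contains (L + 1) = true
        then (if D.contains (L - 1) = true then D.getD L [] ++ D.getD (L - 1) []
              else D.getD L []) ++ D.getD (L + 1) []
        else (if D.contains (L - 1) = true then D.getD L [] ++ D.getD (L - 1) []
              else D.getD L []))) id
    = (PySem.List.sorted U id).filter
        (fun w => decide (L - 1 ≤ PySem.Str.len w) && decide (PySem.Str.len w ≤ L + 1)) := by
  set g : List String :=
    (if D.contains (L + 1) = true
      then (if D.contains (L - 1) = true then D.getD L [] ++ D.getD (L - 1) []
            else D.getD L []) ++ D.getD (L + 1) []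
      else (if D.contains (L - 1) = true then D.getD L [] ++ D.getD (L - 1) []
            else D.getD L [])) with hgdef
  have hmemg : ∀ w, w ∈ g ↔ w ∈ U ∧ (PySem.Str.len w = L ∨ PySem.Str.len w = L - 1
      ∨ PySem.Str.len w = L + 1) := by
    intro w
    by_cases h1 : D.contains (L - 1) = true <;> by_cases h2 : D.contains (L + 1) = true
    · simp [hgdef, h1, h2, hg, List.mem_filter, PySem.Str.len]
      tauto
    · have n2 : w ∈ U → ¬ ((w.length : Int) = L + 1) := by
        intro hw hl
        rw [hc] at h2
        exact h2 (decide_eq_true (List.mem_map.mpr ⟨w, hw, hl⟩))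
      simp [hgdef, h1, h2, hg, List.mem_filter, PySem.Str.len]
      tauto
    · have n1 : w ∈ U → ¬ ((w.length : Int) = L - 1) := by
        intro hw hl
        rw [hc] at h1
        exact h1 (decide_eq_true (List.mem_map.mpr ⟨w, hw, hl⟩))
      simp [hgdef, h1, h2, hg, List.mem_filter, PySem.Str.len]
      tauto
    · have n1 : w ∈ U → ¬ ((w.length : Int) = L - 1) := by
        intro hw hl
        rw [hc] at h1
        exact h1 (decide_eq_true (List.mem_map.mpr ⟨w, hw, hl⟩))
      have n2 : w ∈ U → ¬ ((w.length : Int) = L + 1) := by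
        intro hw hl
        rw [hc] at h2
        exact h2 (decide_eq_true (List.mem_map.mpr ⟨w, hw, hl⟩))
      simp [hgdef, h1, h2, hg, List.mem_filter, PySem.Str.len]
      tauto
  have hndU : (PySem.List.sorted U id).Nodup :=
    ((PySem.List.sorted_perm U id false).nodup_iff).mpr hU
  refine PySem.List.sorted_eq_of_perm_of_pairwise_lt _ _ id ?_ ?_
  · refine List.perm_of_nodup_nodup_toFinset_eq (hndU.filter _) (PySem.Set.nodup_ofList g) ?_
    ext w
    simp only [List.mem_toFinset, List.mem_filter, pv_mem_sorted, PySem.Set.mem_ofList,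
      hmemg w, Bool.and_eq_true, decide_eq_true_eq]
    constructor
    · rintro ⟨hw, hr⟩; exact ⟨hw, by omega⟩
    · rintro ⟨hw, hr⟩; exact ⟨hw, by omega⟩
  · have hle := PySem.List.sorted_pairwise U id
    have hlt : (PySem.List.sorted U id).Pairwise (fun a b => (a : String) < b) :=
      (hle.and hndU).imp (fun hab => lt_of_le_of_ne hab.1 hab.2)
    exact hlt.sublist List.filter_sublist

-- ===== VERDICT (by name: the statement is the Claim_ definition above) =====
theorem comparison_groups_spec : Claim_equal_comparison_groups := by
  intro word_list _
  show comparison_groups word_list = comparison_groups_alt word_list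
  unfold comparison_groups comparison_groups_alt
  simp only []
  set U : List String := PySem.Set.ofList word_list with hUdef
  have hU : U.Nodup := PySem.Set.nodup_ofList word_list
  set D : PySem.Dict Int (List String) :=
    U.foldl (fun d w => d.modify (PySem.Str.len w) [] (fun l => l ++ [w])) ⟨[]⟩ with hDdef
  have hg : ∀ L, D.getD L [] = U.filter (fun w => PySem.Str.len w == L) := by
    intro L
    rw [hDdef, pv_fold_getD]
    simp [PySem.Dict.getD, PySem.Dict.get?]
  have hc : ∀ L, D.contains L = decide (L ∈ U.map PySem.Str.len) := by
    intro L
    rw [hDdef, pv_fold_contains]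
    simp [PySem.Dict.contains]
  have hlen : PySem.List.sorted D.keys id
      = PySem.List.sorted (PySem.Set.ofList ((PySem.List.sorted U id).map PySem.Str.len)) id := by
    refine pv_sorted_eq_of_perm_nodup _ _ ?_ (PySem.Set.nodup_ofList _)
    refine List.perm_of_nodup_nodup_toFinset_eq ?_ (PySem.Set.nodup_ofList _) ?_
    · rw [hDdef]
      refine pv_fold_keys_nodup U ⟨[]⟩ ?_
      simp [PySem.Dict.keys]
    · ext L
      have h1 : L ∈ D.keys ↔ L ∈ U.map PySem.Str.len := by
        rw [← pv_contains_iff_mem_keys, hc L]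
        simp
      have h2 : L ∈ (PySem.List.sorted U id).map PySem.Str.len ↔ L ∈ U.map PySem.Str.len :=
        ((PySem.List.sorted_perm U id false).map PySem.Str.len).mem_iff
      simp only [List.mem_toFinset, h1, PySem.Set.mem_ofList, h2]
  rw [hlen]
  exact PySem.List.foldl_congr_mem _ _ _ _ (fun acc L _ => by rw [pv_body_eq U hU D hg hc L])
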